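-- pv_equiv track=rewrite | github.com/xianhe-zhang/leetcodeNote | 2023找工/2-TwosigmaVO.py | largest_group_in_same_company
-- ===== SOURCE A (Python) =====
-- from collections import defaultdict, deque
--
-- def largest_group_in_same_company(paired_friends):
--     company_groups = defaultdict(list)
--     all_groups = []
--
--     for friends in paired_friends:
--         company_groups[friends[2]].append([friends[0], friends[1]])
--
--     for company, friend_pairs in company_groups.items():
--         friendships = defaultdict(list)
--         # Populate friendships with friend_id: direct friends
--         for friendship in friend_pairs:
--             friendships[friendship[0]].append(friendship[1])
--             friendships[friendship[1]].append(friendship[0])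
--
--         # BFS on each ungrouped friend
--         visited = set()
--         for f, direct_friends in friendships.items():
--             if f not in visited:
--                 visited.add(f)
--                 friends_group = [f]
--                 friends_of_friend = deque(direct_friends)
--
--                 while friends_of_friend:
--                     current_friend = friends_of_friend.popleft()
--                     if current_friend not in visited:
--                         visited.add(current_friend)
--                         friends_group.append(current_friend)
--                         for indirect_friend in friendships[current_friend]:
--                             if indirect_friend not in visited:
--                                 friends_of_friend.append(indirect_friend)
--
--                 all_groups.append(friends_group)
--     # 上面找到了
--     all_groups.sort(key=len, reverse=True)
--     max_product = 0
--     last_group_size = len(all_groups[0])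
--
--     for group in all_groups:
--         if len(group) == last_group_size:
--             group.sort(reverse=True)
--             if len(group) >= 2:
--                 max_product = max(group[0] * group[1], max_product)
--         else:
--             break
--
--     return max_product
-- ===== SOURCE B (Python) =====
-- from collections import defaultdict
--
--
-- def largest_group_in_same_company(paired_friends):
--     company_groups = defaultdict(list)
--     for friends in paired_friends:
--         company_groups[friends[2]].append([friends[0], friends[1]])
--
--     # one (size, top1, top2) summary per friend component: no group lists, no sorting
--     summaries = []
--     for friend_pairs in company_groups.values():
--         adj = {}
--         for pair in friend_pairs:
--             adj.setdefault(pair[0], []).append(pair[1])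
--             adj.setdefault(pair[1], []).append(pair[0])
--
--         visited = set()
--         for f in adj:
--             if f not in visited:
--                 size = 0
--                 top1 = None
--                 top2 = None
--                 stack = [f]
--                 while stack:
--                     cur = stack.pop()  # depth-first: most recently pushed
--                     if cur in visited:
--                         continue
--                     visited.add(cur)
--                     size += 1
--                     if top1 is None or cur > top1:
--                         top1, top2 = cur, top1
--                     elif top2 is None or cur > top2:
--                         top2 = cur
--                     for n in adj[cur]:
--                         if n not in visited:
--                             stack.append(n)
--                 summaries.append((size, top1, top2))
--
--     if not summaries:
--         return 0
--     m = max(size for size, _, _ in summaries)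
--     prods = [t1 * t2 for size, t1, t2 in summaries if size == m and size >= 2]
--     return max(prods + [0])
-- ===== Notes on version B (the rewrite author's own statement) =====
-- stated objective: alternative
-- what changed: B replaces A's queue-based BFS component search and its collect-all-groups/global-sort/per-group-sort/scan aggregation by a stack-based DFS that streams one (size, two-largest-ids) summary per component and a single max-of-maxima pass, so B builds no group lists and sorts nothing.
import Mathlib
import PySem

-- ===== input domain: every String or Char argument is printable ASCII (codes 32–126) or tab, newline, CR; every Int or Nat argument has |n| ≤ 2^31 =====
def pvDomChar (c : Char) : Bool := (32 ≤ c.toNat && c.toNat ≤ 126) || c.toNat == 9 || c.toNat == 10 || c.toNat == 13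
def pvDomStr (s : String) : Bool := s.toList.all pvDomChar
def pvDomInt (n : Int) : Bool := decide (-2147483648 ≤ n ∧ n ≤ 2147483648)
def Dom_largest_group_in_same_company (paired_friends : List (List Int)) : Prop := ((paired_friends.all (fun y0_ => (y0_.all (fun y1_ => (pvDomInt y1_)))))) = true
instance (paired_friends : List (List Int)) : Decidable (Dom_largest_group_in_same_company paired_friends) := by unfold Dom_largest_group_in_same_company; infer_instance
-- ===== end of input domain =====

-- B replaces A's queue-based BFS component search plus collect-all-groups/sort/scan aggregation by a
-- stack-based DFS that streams one (size, two-largest-ids) summary per component and a single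
-- max-of-maxima pass: no group lists are built and nothing is sorted (objective: alternative).

-- ===== PORT A =====

-- termination helpers for the worklist loops (cited by decreasing_by)
theorem containsAdd (s : PySem.Set Int) (c k : Int) :
    PySem.Set.contains (PySem.Set.add s c) k = (PySem.Set.contains s k || (k == c)) := by
  apply Bool.eq_iff_iff.2
  rw [Bool.or_eq_true, PySem.Set.contains_iff, PySem.Set.contains_iff, PySem.Set.mem_add,
    beq_iff_eq]

theorem pvFilterAddLt {l : List Int} {s : PySem.Set Int} {c : Int} (hc : c ∈ l) (hcs : c ∉ s) :
    (l.filter (fun k => !(PySem.Set.contains (PySem.Set.add s c) k))).length <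
      (l.filter (fun k => !(PySem.Set.contains s k))).length := by
  have hpred : ∀ k : Int, (!(PySem.Set.contains (PySem.Set.add s c) k)) =
      ((!(k == c)) && !(PySem.Set.contains s k)) := by
    intro k
    rw [containsAdd]
    cases hb : PySem.Set.contains s k <;> cases hb2 : (k == c) <;> simp
  simp only [hpred]
  rw [← List.filter_filter]
  have hscf : PySem.Set.contains s c = false := by
    rw [← Bool.not_eq_true]; exact fun h => hcs ((PySem.Set.contains_iff _ _).1 h)
  have hcm : c ∈ l.filter (fun k => !(PySem.Set.contains s k)) :=
    List.mem_filter.2 ⟨hc, by simp only [hscf, Bool.not_false]⟩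
  exact List.length_filter_lt_length_iff_exists.2 ⟨c, hcm, by simp⟩

theorem pvFilterAddEq {l : List Int} (s : PySem.Set Int) {c : Int} (hc : c ∉ l) :
    (l.filter (fun k => !(PySem.Set.contains (PySem.Set.add s c) k))).length =
      (l.filter (fun k => !(PySem.Set.contains s k))).length := by
  have : l.filter (fun k => !(PySem.Set.contains (PySem.Set.add s c) k)) =
      l.filter (fun k => !(PySem.Set.contains s k)) := by
    apply List.filter_congr
    intro k hk
    rw [containsAdd]
    have : (k == c) = false := by
      simp only [beq_eq_false_iff_ne, ne_eq]; rintro rfl; exact hc hk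
    simp [this]
  rw [this]

-- the `while friends_of_friend:` BFS loop of A (queue pops at the front)
def pyBfs (adj : PySem.Dict Int (List Int)) (visited : PySem.Set Int) (group : List Int)
    (queue : List Int) : PySem.Set Int × List Int :=
  match queue with
  | [] => (visited, group)
  | c :: rest =>
    if PySem.Set.contains visited c then pyBfs adj visited group rest
    else
      let v' := PySem.Set.add visited c
      pyBfs adj v' (group ++ [c])
        (rest ++ (adj.getD c []).filter (fun n => !(PySem.Set.contains v' n)))
termination_by ((adj.keys.filter (fun k => !(PySem.Set.contains visited k))).length, queue.length)
decreasing_by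
  · exact Prod.Lex.right _ (by simp)
  · rename_i h
    by_cases hck : c ∈ adj.keys
    · exact Prod.Lex.left _ _
        (pvFilterAddLt hck (fun hmem => h ((PySem.Set.contains_iff _ _).2 hmem)))
    · rw [Prod.lex_iff]
      refine Or.inr ⟨pvFilterAddEq visited hck, ?_⟩
      have : adj.getD c [] = [] := PySem.Dict.getD_of_not_contains adj []
        (by rw [← Bool.not_eq_true]; exact fun hcon => hck ((PySem.Dict.contains_iff_mem_keys adj c).1 hcon))
      simp [this]

-- `defaultdict(list)` population of `friendships` from the company's pair list
def buildAdjA (friend_pairs : List (List Int)) : PySem.Dict Int (List Int) :=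
  friend_pairs.foldl (fun d p =>
    (d.modify (PySem.List.pyGetD p 0 0) [] (· ++ [PySem.List.pyGetD p 1 0])).modify
      (PySem.List.pyGetD p 1 0) [] (· ++ [PySem.List.pyGetD p 0 0])) PySem.Dict.empty

-- body of `for f, direct_friends in friendships.items():`
def compStepA (friendships : PySem.Dict Int (List Int))
    (st : PySem.Set Int × List (List Int)) (fd : Int × List Int) :
    PySem.Set Int × List (List Int) :=
  if PySem.Set.contains st.1 fd.1 then st
  else
    let r := pyBfs friendships (PySem.Set.add st.1 fd.1) [fd.1] fd.2
    (r.1, st.2 ++ [r.2])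

-- body of `for company, friend_pairs in company_groups.items():`
def companyA (ag : List (List Int)) (cf : Int × List (List Int)) : List (List Int) :=
  let friendships := buildAdjA cf.2
  (friendships.items.foldl (compStepA friendships) (PySem.Set.empty, ag)).2

-- final `for group in all_groups:` loop with its break
def aggLoopA (groups : List (List Int)) (last_group_size : Nat) (max_product : Int) : Int :=
  match groups with
  | [] => max_product
  | g :: rest =>
    if g.length = last_group_size then
      let gs := PySem.List.sorted g (fun x => x) true
      aggLoopA rest last_group_size
        (if 2 ≤ g.length then
           max (PySem.List.pyGetD gs 0 0 * PySem.List.pyGetD gs 1 0) max_product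
         else max_product)
    else max_product

def largest_group_in_same_company (paired_friends : List (List Int)) : Int :=
  let company_groups :=
    paired_friends.foldl (fun d friends =>
      d.modify (PySem.List.pyGetD friends 2 0) []
        (· ++ [[PySem.List.pyGetD friends 0 0, PySem.List.pyGetD friends 1 0]])) PySem.Dict.empty
  let all_groups := company_groups.items.foldl companyA []
  let all_groups := PySem.List.sorted all_groups (fun g => g.length) true
  -- `all_groups[0]` raises IndexError on an empty list: Pre_ excludes paired_friends = []
  let last_group_size := (PySem.List.pyGetD all_groups 0 []).length
  aggLoopA all_groups last_group_size 0

-- ===== PORT B =====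

-- the `if top1 is None or cur > top1: ... elif ...` update of the two largest ids seen
def top2step (t : Option Int × Option Int) (c : Int) : Option Int × Option Int :=
  match t.1 with
  | none => (some c, t.1)
  | some a =>
    if a < c then (some c, t.1)
    else
      match t.2 with
      | none => (t.1, some c)
      | some b => if b < c then (t.1, some c) else (t.1, t.2)

-- the `while stack:` DFS loop of B (stack pops at the back)
def pyDfs (adj : PySem.Dict Int (List Int)) (visited : PySem.Set Int) (size : Int)
    (top1 top2 : Option Int) (stack : List Int) :
    PySem.Set Int × Int × Option Int × Option Int :=
  if hst : stack = [] then (visited, size, top1, top2)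
  else
    let cur := stack.getLast hst
    let rest := stack.dropLast
    if PySem.Set.contains visited cur then pyDfs adj visited size top1 top2 rest
    else
      let v' := PySem.Set.add visited cur
      let t := top2step (top1, top2) cur
      pyDfs adj v' (size + 1) t.1 t.2
        (rest ++ (adj.getD cur []).filter (fun n => !(PySem.Set.contains v' n)))
termination_by ((adj.keys.filter (fun k => !(PySem.Set.contains visited k))).length, stack.length)
decreasing_by
  · exact Prod.Lex.right _ (by
      have : stack.dropLast.length = stack.length - 1 := List.length_dropLast
      have hpos : 0 < stack.length := List.length_pos_of_ne_nil hst
      omega)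
  · rename_i h
    by_cases hck : stack.getLast hst ∈ adj.keys
    · exact Prod.Lex.left _ _
        (pvFilterAddLt hck (fun hmem => h ((PySem.Set.contains_iff _ _).2 hmem)))
    · rw [Prod.lex_iff]
      refine Or.inr ⟨pvFilterAddEq visited hck, ?_⟩
      have : adj.getD (stack.getLast hst) [] = [] := PySem.Dict.getD_of_not_contains adj []
        (by rw [← Bool.not_eq_true]; exact fun hcon => hck ((PySem.Dict.contains_iff_mem_keys adj _).1 hcon))
      have hpos : 0 < stack.length := List.length_pos_of_ne_nil hst
      have : stack.dropLast.length = stack.length - 1 := List.length_dropLast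
      simp_all

-- plain-dict `adj.setdefault(...).append(...)` population of `adj`
def buildAdjB (friend_pairs : List (List Int)) : PySem.Dict Int (List Int) :=
  friend_pairs.foldl (fun d p =>
    (((d.setdefault (PySem.List.pyGetD p 0 0) []).modify (PySem.List.pyGetD p 0 0) []
        (· ++ [PySem.List.pyGetD p 1 0])).setdefault (PySem.List.pyGetD p 1 0) []).modify
      (PySem.List.pyGetD p 1 0) [] (· ++ [PySem.List.pyGetD p 0 0])) PySem.Dict.empty

-- body of `for f in adj:`
def compStepB (adj : PySem.Dict Int (List Int))
    (st : PySem.Set Int × List (Int × Option Int × Option Int)) (fd : Int × List Int) :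
    PySem.Set Int × List (Int × Option Int × Option Int) :=
  if PySem.Set.contains st.1 fd.1 then st
  else
    let r := pyDfs adj st.1 0 none none [fd.1]
    (r.1, st.2 ++ [r.2])

-- body of `for friend_pairs in company_groups.values():`
def companyB (sl : List (Int × Option Int × Option Int)) (cf : Int × List (List Int)) :
    List (Int × Option Int × Option Int) :=
  let adj := buildAdjB cf.2
  (adj.items.foldl (compStepB adj) (PySem.Set.empty, sl)).2

def largest_group_in_same_company_alt (paired_friends : List (List Int)) : Int :=
  let company_groups :=
    paired_friends.foldl (fun d friends =>
      d.modify (PySem.List.pyGetD friends 2 0) []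
        (· ++ [[PySem.List.pyGetD friends 0 0, PySem.List.pyGetD friends 1 0]])) PySem.Dict.empty
  let summaries := company_groups.items.foldl companyB []
  if summaries = [] then 0
  else
    -- `max(size for size, _, _ in summaries)`: the list is nonempty here, so `.getD 0` is never hit
    let m := (PySem.List.max? (summaries.map (fun s => s.1)) (fun x => x)).getD 0
    -- under the filter size ≥ 2, so top1/top2 are ints (not None): `.getD 0` is never hit
    let prods := (summaries.filter (fun s => decide (s.1 = m ∧ 2 ≤ s.1))).map
      (fun s => s.2.1.getD 0 * s.2.2.getD 0)
    (PySem.List.max? (prods ++ [(0 : Int)]) (fun x => x)).getD 0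

-- ===== PRECONDITION & SPEC =====

-- A indexes friends[0]/friends[1]/friends[2] (IndexError on a row shorter than 3) and
-- all_groups[0] (IndexError when paired_friends is empty): Pre_ excludes exactly those inputs.
def Pre_largest_group_in_same_company (paired_friends : List (List Int)) : Prop :=
  paired_friends ≠ [] ∧ ∀ r ∈ paired_friends, 3 ≤ r.length
instance (paired_friends : List (List Int)) : Decidable (Pre_largest_group_in_same_company paired_friends) := by
  unfold Pre_largest_group_in_same_company; infer_instance

def pvWitness_largest_group_in_same_company : List (List Int) :=
  [[1, 2, 10], [2, 3, 10], [4, 5, 20]]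

def Spec_largest_group_in_same_company (paired_friends : List (List Int)) (out : Int) : Prop :=
  out = largest_group_in_same_company_alt paired_friends
instance (paired_friends : List (List Int)) (out : Int) : Decidable (Spec_largest_group_in_same_company paired_friends out) := by
  unfold Spec_largest_group_in_same_company; infer_instance

-- ===== CLAIM (what is proved, stated in full; the proofs are below) =====
def Claim_equal_largest_group_in_same_company : Prop := ∀ (paired_friends : List (List Int)), Dom_largest_group_in_same_company paired_friends → Pre_largest_group_in_same_company paired_friends → Spec_largest_group_in_same_company paired_friends (largest_group_in_same_company paired_friends)


-- ===== LEMMAS AND PROOFS =====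

-- ---- the friendship graph of one company ----
def AdjRel (adj : PySem.Dict Int (List Int)) (u v : Int) : Prop := v ∈ adj.getD u []
def Reach (adj : PySem.Dict Int (List Int)) (f x : Int) : Prop :=
  Relation.ReflTransGen (AdjRel adj) f x
def SymAdj (adj : PySem.Dict Int (List Int)) : Prop := ∀ a b, AdjRel adj a b → AdjRel adj b a
def Closed (adj : PySem.Dict Int (List Int)) (s : List Int) : Prop :=
  ∀ v ∈ s, ∀ n, AdjRel adj v n → n ∈ s

theorem reach_not_mem_closed {adj : PySem.Dict Int (List Int)} {V0 : List Int} {f x : Int}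
    (hsym : SymAdj adj) (hcl : Closed adj V0) (hf : f ∉ V0) (hr : Reach adj f x) : x ∉ V0 := by
  induction hr with
  | refl => exact hf
  | tail _ h2 ih => exact fun hx => ih (hcl _ hx _ (hsym _ _ h2))

theorem reach_subset_closed {adj : PySem.Dict Int (List Int)} {G : List Int} {f x : Int}
    (hf : f ∈ G) (hG : Closed adj G) (hr : Reach adj f x) : x ∈ G := by
  induction hr with
  | refl => exact hf
  | tail _ h2 ih => exact hG _ ih _ h2

-- ---- the BFS loop visits exactly the component of f ----
theorem pyBfs_spec (adj : PySem.Dict Int (List Int)) (hsym : SymAdj adj) :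
    ∀ (V0 G W : List Int) (f : Int),
      Closed adj V0 →
      (V0 ++ G).Nodup →
      f ∉ V0 →
      (f ∈ G ∨ f ∈ W) →
      (∀ x ∈ G, Reach adj f x) →
      (∀ w ∈ W, Reach adj f w) →
      (∀ v ∈ G, ∀ n, AdjRel adj v n → n ∈ V0 ++ G ∨ n ∈ W) →
      ∃ G', pyBfs adj (V0 ++ G) G W = (V0 ++ G', G') ∧ (V0 ++ G').Nodup ∧
        (∀ x, x ∈ G' ↔ Reach adj f x) := by
  suffices H : ∀ (n m : Nat) (V0 G W : List Int) (f : Int),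
      (adj.keys.filter (fun k => !(PySem.Set.contains (V0 ++ G) k))).length = n →
      W.length = m →
      Closed adj V0 → (V0 ++ G).Nodup → f ∉ V0 → (f ∈ G ∨ f ∈ W) →
      (∀ x ∈ G, Reach adj f x) → (∀ w ∈ W, Reach adj f w) →
      (∀ v ∈ G, ∀ nn, AdjRel adj v nn → nn ∈ V0 ++ G ∨ nn ∈ W) →
      ∃ G', pyBfs adj (V0 ++ G) G W = (V0 ++ G', G') ∧ (V0 ++ G').Nodup ∧
        (∀ x, x ∈ G' ↔ Reach adj f x) by
    intro V0 G W f h1 h2 h3 h4 h5 h6 h7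
    exact H _ _ V0 G W f rfl rfl h1 h2 h3 h4 h5 h6 h7
  intro n
  induction n using Nat.strong_induction_on with
  | _ n ihn =>
  intro m
  induction m using Nat.strong_induction_on with
  | _ m ihm =>
  intro V0 G W f hn hm hcl0 hnd hf0 hfGW hG hW hfront
  cases W with
  | nil =>
    refine ⟨G, by rw [pyBfs], hnd, ?_⟩
    have hfG : f ∈ G := hfGW.resolve_right (by simp)
    intro x
    refine ⟨fun hx => hG x hx, fun hr => ?_⟩
    refine reach_subset_closed hfG ?_ hr
    intro v hv nn hadj
    rcases hfront v hv nn hadj with hmem | hmem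
    · rcases List.mem_append.1 hmem with h0 | h0
      · exact absurd h0 (reach_not_mem_closed hsym hcl0 hf0 ((hG v hv).tail hadj))
      · exact h0
    · cases hmem
  | cons c rest =>
    by_cases hvc : c ∈ V0 ++ G
    · -- already visited: skip
      have hcb : PySem.Set.contains (V0 ++ G) c = true := (PySem.Set.contains_iff _ _).2 hvc
      have step : pyBfs adj (V0 ++ G) G (c :: rest) = pyBfs adj (V0 ++ G) G rest := by
        rw [pyBfs, if_pos hcb]
      rw [step]
      refine ihm rest.length (by simp at hm; omega) V0 G rest f hn rfl hcl0 hnd hf0 ?_ hG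
        (fun w hw => hW w (List.mem_cons_of_mem _ hw)) ?_
      · rcases hfGW with h | h
        · exact Or.inl h
        · rcases List.mem_cons.1 h with rfl | h2
          · rcases List.mem_append.1 hvc with h3 | h3
            · exact absurd h3 hf0
            · exact Or.inl h3
          · exact Or.inr h2
      · intro v hv nn hadj
        rcases hfront v hv nn hadj with hmem | hmem
        · exact Or.inl hmem
        · rcases List.mem_cons.1 hmem with rfl | h2
          · exact Or.inl hvc
          · exact Or.inr h2
    · -- new node c
      have hcb : PySem.Set.contains (V0 ++ G) c = false := by
        rw [← Bool.not_eq_true]; exact fun h => hvc ((PySem.Set.contains_iff _ _).1 h)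
      have hadd : PySem.Set.add (V0 ++ G) c = V0 ++ (G ++ [c]) := by
        rw [PySem.Set.add_of_not_mem hvc, List.append_assoc]
      have hcR : Reach adj f c := hW c (List.mem_cons_self)
      have step : pyBfs adj (V0 ++ G) G (c :: rest) =
          pyBfs adj (V0 ++ (G ++ [c])) (G ++ [c])
            (rest ++ (adj.getD c []).filter
              (fun nn => !(PySem.Set.contains (V0 ++ (G ++ [c])) nn))) := by
        rw [pyBfs, if_neg (by rw [hcb]; exact Bool.false_ne_true)]
        simp only [hadd]
      rw [step]
      -- the invariants for the recursive call
      have hnd' : (V0 ++ (G ++ [c])).Nodup := by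
        rw [← List.append_assoc]
        refine List.Nodup.append hnd (List.nodup_singleton c) ?_
        intro a ha hb
        rcases List.mem_singleton.1 hb with rfl
        exact hvc ha
      have hfGW' : f ∈ G ++ [c] ∨ f ∈ rest ++ (adj.getD c []).filter
          (fun nn => !(PySem.Set.contains (V0 ++ (G ++ [c])) nn)) := by
        rcases hfGW with h | h
        · exact Or.inl (List.mem_append.2 (Or.inl h))
        · rcases List.mem_cons.1 h with rfl | h2
          · exact Or.inl (List.mem_append.2 (Or.inr (List.mem_singleton.2 rfl)))
          · exact Or.inr (List.mem_append.2 (Or.inl h2))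
      have hG' : ∀ x ∈ G ++ [c], Reach adj f x := by
        intro x hx
        rcases List.mem_append.1 hx with h | h
        · exact hG x h
        · rcases List.mem_singleton.1 h with rfl; exact hcR
      have hW' : ∀ w ∈ rest ++ (adj.getD c []).filter
          (fun nn => !(PySem.Set.contains (V0 ++ (G ++ [c])) nn)), Reach adj f w := by
        intro w hw
        rcases List.mem_append.1 hw with h | h
        · exact hW w (List.mem_cons_of_mem _ h)
        · exact hcR.tail (List.mem_filter.1 h).1
      have hfront' : ∀ v ∈ G ++ [c], ∀ nn, AdjRel adj v nn →
          nn ∈ V0 ++ (G ++ [c]) ∨ nn ∈ rest ++ (adj.getD c []).filter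
            (fun nn => !(PySem.Set.contains (V0 ++ (G ++ [c])) nn)) := by
        intro v hv nn hadj
        rcases List.mem_append.1 hv with h | h
        · rcases hfront v h nn hadj with hmem | hmem
          · rw [← List.append_assoc]
            exact Or.inl (List.mem_append.2 (Or.inl hmem))
          · rcases List.mem_cons.1 hmem with rfl | h2
            · exact Or.inl (List.mem_append.2 (Or.inr (List.mem_append.2 (Or.inr (List.mem_singleton.2 rfl)))))
            · exact Or.inr (List.mem_append.2 (Or.inl h2))
        · have hvceq : v = c := List.mem_singleton.1 h
          rw [hvceq] at hadj
          by_cases hnv : nn ∈ V0 ++ (G ++ [c])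
          · exact Or.inl hnv
          · refine Or.inr (List.mem_append.2 (Or.inr (List.mem_filter.2 ⟨hadj, ?_⟩)))
            simpa using hnv
      by_cases hck : c ∈ adj.keys
      · -- measure on keys strictly decreases
        have hlt : (adj.keys.filter (fun k => !(PySem.Set.contains (V0 ++ (G ++ [c])) k))).length < n := by
          rw [← hadd, ← hn]
          exact pvFilterAddLt hck hvc
        exact ihn _ hlt _ V0 (G ++ [c]) _ f rfl rfl hcl0 hnd' hf0 hfGW' hG' hW' hfront'
      · -- c is not a key: adjacency empty, worklist shrinks
        have hgd : adj.getD c [] = [] := PySem.Dict.getD_of_not_contains adj []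
          (by rw [← Bool.not_eq_true]
              exact fun hcon => hck ((PySem.Dict.contains_iff_mem_keys adj c).1 hcon))
        have hmeq : (adj.keys.filter (fun k => !(PySem.Set.contains (V0 ++ (G ++ [c])) k))).length = n := by
          rw [← hadd, ← hn]
          exact pvFilterAddEq _ hck
        have hml : (rest ++ (adj.getD c []).filter
            (fun nn => !(PySem.Set.contains (V0 ++ (G ++ [c])) nn))).length < m := by
          simp [hgd]; simp at hm; omega
        exact ihm _ hml V0 (G ++ [c]) _ f hmeq rfl hcl0 hnd' hf0 hfGW' hG' hW' hfront'

-- ---- the DFS loop visits exactly the component of f, streaming (size, top1, top2) ----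
theorem pyDfs_spec (adj : PySem.Dict Int (List Int)) (hsym : SymAdj adj) :
    ∀ (V0 G W : List Int) (f : Int),
      Closed adj V0 →
      (V0 ++ G).Nodup →
      f ∉ V0 →
      (f ∈ G ∨ f ∈ W) →
      (∀ x ∈ G, Reach adj f x) →
      (∀ w ∈ W, Reach adj f w) →
      (∀ v ∈ G, ∀ nn, AdjRel adj v nn → nn ∈ V0 ++ G ∨ nn ∈ W) →
      ∃ G', pyDfs adj (V0 ++ G) (G.length : Int) (G.foldl top2step (none, none)).1
              (G.foldl top2step (none, none)).2 W =
            (V0 ++ G', ((G'.length : Int), (G'.foldl top2step (none, none)).1,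
              (G'.foldl top2step (none, none)).2)) ∧
        (V0 ++ G').Nodup ∧ (∀ x, x ∈ G' ↔ Reach adj f x) := by
  suffices H : ∀ (n m : Nat) (V0 G W : List Int) (f : Int),
      (adj.keys.filter (fun k => !(PySem.Set.contains (V0 ++ G) k))).length = n →
      W.length = m →
      Closed adj V0 → (V0 ++ G).Nodup → f ∉ V0 → (f ∈ G ∨ f ∈ W) →
      (∀ x ∈ G, Reach adj f x) → (∀ w ∈ W, Reach adj f w) →
      (∀ v ∈ G, ∀ nn, AdjRel adj v nn → nn ∈ V0 ++ G ∨ nn ∈ W) →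
      ∃ G', pyDfs adj (V0 ++ G) (G.length : Int) (G.foldl top2step (none, none)).1
              (G.foldl top2step (none, none)).2 W =
            (V0 ++ G', ((G'.length : Int), (G'.foldl top2step (none, none)).1,
              (G'.foldl top2step (none, none)).2)) ∧
        (V0 ++ G').Nodup ∧ (∀ x, x ∈ G' ↔ Reach adj f x) by
    intro V0 G W f h1 h2 h3 h4 h5 h6 h7
    exact H _ _ V0 G W f rfl rfl h1 h2 h3 h4 h5 h6 h7
  intro n
  induction n using Nat.strong_induction_on with
  | _ n ihn =>
  intro m
  induction m using Nat.strong_induction_on with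
  | _ m ihm =>
  intro V0 G W f hn hm hcl0 hnd hf0 hfGW hG hW hfront
  by_cases hWnil : W = []
  · subst hWnil
    refine ⟨G, by rw [pyDfs, dif_pos rfl], hnd, ?_⟩
    have hfG : f ∈ G := hfGW.resolve_right (by simp)
    intro x
    refine ⟨fun hx => hG x hx, fun hr => ?_⟩
    refine reach_subset_closed hfG ?_ hr
    intro v hv nn hadj
    rcases hfront v hv nn hadj with hmem | hmem
    · rcases List.mem_append.1 hmem with h0 | h0
      · exact absurd h0 (reach_not_mem_closed hsym hcl0 hf0 ((hG v hv).tail hadj))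
      · exact h0
    · cases hmem
  · -- W = rest ++ [c]
    set c := W.getLast hWnil with hcdef
    set rest := W.dropLast with hrestdef
    have hdecomp : rest ++ [c] = W := List.dropLast_append_getLast hWnil
    have hmemW : ∀ x : Int, x ∈ W ↔ x ∈ rest ∨ x = c := by
      intro x; rw [← hdecomp]; simp
    have hlenrest : rest.length + 1 = W.length := by
      rw [← hdecomp]; simp
    have hcW : c ∈ W := (hmemW c).2 (Or.inr rfl)
    by_cases hvc : c ∈ V0 ++ G
    · -- already visited: skip
      have hcb : PySem.Set.contains (V0 ++ G) c = true := (PySem.Set.contains_iff _ _).2 hvc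
      have step : pyDfs adj (V0 ++ G) (G.length : Int) (G.foldl top2step (none, none)).1
            (G.foldl top2step (none, none)).2 W =
          pyDfs adj (V0 ++ G) (G.length : Int) (G.foldl top2step (none, none)).1
            (G.foldl top2step (none, none)).2 rest := by
        rw [pyDfs, dif_neg hWnil, if_pos hcb]
      rw [step]
      refine ihm rest.length (by omega) V0 G rest f hn rfl hcl0 hnd hf0 ?_ hG
        (fun w hw => hW w ((hmemW w).2 (Or.inl hw))) ?_
      · rcases hfGW with h | h
        · exact Or.inl h
        · rcases (hmemW f).1 h with h2 | rfl
          · exact Or.inr h2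
          · rcases List.mem_append.1 hvc with h3 | h3
            · exact absurd h3 hf0
            · exact Or.inl h3
      · intro v hv nn hadj
        rcases hfront v hv nn hadj with hmem | hmem
        · exact Or.inl hmem
        · rcases (hmemW nn).1 hmem with h2 | rfl
          · exact Or.inr h2
          · exact Or.inl hvc
    · -- new node c
      have hcb : PySem.Set.contains (V0 ++ G) c = false := by
        rw [← Bool.not_eq_true]; exact fun h => hvc ((PySem.Set.contains_iff _ _).1 h)
      have hadd : PySem.Set.add (V0 ++ G) c = V0 ++ (G ++ [c]) := by
        rw [PySem.Set.add_of_not_mem hvc, List.append_assoc]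
      have hcR : Reach adj f c := hW c hcW
      have hfoldstep : (G ++ [c]).foldl top2step (none, none) =
          top2step (G.foldl top2step (none, none)) c := by
        simp [List.foldl_append]
      have step : pyDfs adj (V0 ++ G) (G.length : Int) (G.foldl top2step (none, none)).1
            (G.foldl top2step (none, none)).2 W =
          pyDfs adj (V0 ++ (G ++ [c])) (((G ++ [c]).length : Int))
            ((G ++ [c]).foldl top2step (none, none)).1
            ((G ++ [c]).foldl top2step (none, none)).2
            (rest ++ (adj.getD c []).filter
              (fun nn => !(PySem.Set.contains (V0 ++ (G ++ [c])) nn))) := by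
        rw [pyDfs, dif_neg hWnil, if_neg (by rw [← hcdef, hcb]; exact Bool.false_ne_true)]
        simp only [← hcdef, ← hrestdef, hadd, hfoldstep]
        norm_num [List.length_append]
      rw [step]
      have hnd' : (V0 ++ (G ++ [c])).Nodup := by
        rw [← List.append_assoc]
        refine List.Nodup.append hnd (List.nodup_singleton c) ?_
        intro a ha hb
        rcases List.mem_singleton.1 hb with rfl
        exact hvc ha
      have hfGW' : f ∈ G ++ [c] ∨ f ∈ rest ++ (adj.getD c []).filter
          (fun nn => !(PySem.Set.contains (V0 ++ (G ++ [c])) nn)) := by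
        rcases hfGW with h | h
        · exact Or.inl (List.mem_append.2 (Or.inl h))
        · rcases (hmemW f).1 h with h2 | rfl
          · exact Or.inr (List.mem_append.2 (Or.inl h2))
          · exact Or.inl (List.mem_append.2 (Or.inr (List.mem_singleton.2 rfl)))
      have hG' : ∀ x ∈ G ++ [c], Reach adj f x := by
        intro x hx
        rcases List.mem_append.1 hx with h | h
        · exact hG x h
        · rcases List.mem_singleton.1 h with rfl; exact hcR
      have hW' : ∀ w ∈ rest ++ (adj.getD c []).filter
          (fun nn => !(PySem.Set.contains (V0 ++ (G ++ [c])) nn)), Reach adj f w := by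
        intro w hw
        rcases List.mem_append.1 hw with h | h
        · exact hW w ((hmemW w).2 (Or.inl h))
        · exact hcR.tail (List.mem_filter.1 h).1
      have hfront' : ∀ v ∈ G ++ [c], ∀ nn, AdjRel adj v nn →
          nn ∈ V0 ++ (G ++ [c]) ∨ nn ∈ rest ++ (adj.getD c []).filter
            (fun nn => !(PySem.Set.contains (V0 ++ (G ++ [c])) nn)) := by
        intro v hv nn hadj
        rcases List.mem_append.1 hv with h | h
        · rcases hfront v h nn hadj with hmem | hmem
          · rw [← List.append_assoc]
            exact Or.inl (List.mem_append.2 (Or.inl hmem))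
          · rcases (hmemW nn).1 hmem with h2 | rfl
            · exact Or.inr (List.mem_append.2 (Or.inl h2))
            · exact Or.inl (List.mem_append.2 (Or.inr (List.mem_append.2 (Or.inr (List.mem_singleton.2 rfl)))))
        · have hvceq : v = c := List.mem_singleton.1 h
          rw [hvceq] at hadj
          by_cases hnv : nn ∈ V0 ++ (G ++ [c])
          · exact Or.inl hnv
          · refine Or.inr (List.mem_append.2 (Or.inr (List.mem_filter.2 ⟨hadj, ?_⟩)))
            simpa using hnv
      by_cases hck : c ∈ adj.keys
      · have hlt : (adj.keys.filter (fun k => !(PySem.Set.contains (V0 ++ (G ++ [c])) k))).length < n := by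
          rw [← hadd, ← hn]
          exact pvFilterAddLt hck hvc
        exact ihn _ hlt _ V0 (G ++ [c]) _ f rfl rfl hcl0 hnd' hf0 hfGW' hG' hW' hfront'
      · have hgd : adj.getD c [] = [] := PySem.Dict.getD_of_not_contains adj []
          (by rw [← Bool.not_eq_true]
              exact fun hcon => hck ((PySem.Dict.contains_iff_mem_keys adj c).1 hcon))
        have hmeq : (adj.keys.filter (fun k => !(PySem.Set.contains (V0 ++ (G ++ [c])) k))).length = n := by
          rw [← hadd, ← hn]
          exact pvFilterAddEq _ hck
        have hml : (rest ++ (adj.getD c []).filter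
            (fun nn => !(PySem.Set.contains (V0 ++ (G ++ [c])) nn))).length < m := by
          simp [hgd]; omega
        exact ihm _ hml V0 (G ++ [c]) _ f hmeq rfl hcl0 hnd' hf0 hfGW' hG' hW' hfront'

-- ---- the two largest elements of a duplicate-free list ----
def IsTop2 (l : List Int) : Option Int × Option Int → Prop
  | (none, none) => l = []
  | (some a, none) => a ∈ l ∧ ∀ x ∈ l, x = a
  | (some a, some b) => a ∈ l ∧ b ∈ l ∧ b < a ∧ ∀ x ∈ l, x = a ∨ x ≤ b
  | (none, some _) => False

theorem isTop2_step {l : List Int} {t : Option Int × Option Int} {c : Int}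
    (h : IsTop2 l t) (hc : c ∉ l) : IsTop2 (l ++ [c]) (top2step t c) := by
  obtain ⟨t1, t2⟩ := t
  match t1, t2 with
  | none, none =>
    have hl : l = [] := h
    subst hl
    simp only [top2step]
    exact ⟨by simp, by simp⟩
  | none, some b => exact absurd h (by simp [IsTop2])
  | some a, none =>
    obtain ⟨ha, hall⟩ := h
    have hac : a ≠ c := fun h => hc (h ▸ ha)
    by_cases hlt : a < c
    · simp only [top2step, if_pos hlt]
      refine ⟨by simp, by simp [ha], hlt, ?_⟩
      intro x hx
      rcases List.mem_append.1 hx with h1 | h1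
      · exact Or.inr (le_of_eq (hall x h1))
      · exact Or.inl (List.mem_singleton.1 h1)
    · have hgt : c < a := lt_of_le_of_ne (not_lt.1 hlt) (Ne.symm hac)
      simp only [top2step, if_neg hlt]
      refine ⟨by simp [ha], by simp, hgt, ?_⟩
      intro x hx
      rcases List.mem_append.1 hx with h1 | h1
      · exact Or.inl (hall x h1)
      · exact Or.inr (le_of_eq (List.mem_singleton.1 h1))
  | some a, some b =>
    obtain ⟨ha, hb, hba, hall⟩ := h
    have hac : a ≠ c := fun h => hc (h ▸ ha)
    have hbc : b ≠ c := fun h => hc (h ▸ hb)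
    by_cases hlt : a < c
    · simp only [top2step, if_pos hlt]
      refine ⟨by simp, by simp [ha], hlt, ?_⟩
      intro x hx
      rcases List.mem_append.1 hx with h1 | h1
      · rcases hall x h1 with h2 | h2
        · exact Or.inr (le_of_eq h2)
        · exact Or.inr (le_of_lt (lt_of_le_of_lt h2 hba))
      · exact Or.inl (List.mem_singleton.1 h1)
    · have hca : c < a := lt_of_le_of_ne (not_lt.1 hlt) (Ne.symm hac)
      by_cases hltb : b < c
      · simp only [top2step, if_neg hlt, if_pos hltb]
        refine ⟨by simp [ha], by simp, hca, ?_⟩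
        intro x hx
        rcases List.mem_append.1 hx with h1 | h1
        · rcases hall x h1 with h2 | h2
          · exact Or.inl h2
          · exact Or.inr (le_of_lt (lt_of_le_of_lt h2 hltb))
        · exact Or.inr (le_of_eq (List.mem_singleton.1 h1))
      · have hcb : c < b := lt_of_le_of_ne (not_lt.1 hltb) (Ne.symm hbc)
        simp only [top2step, if_neg hlt, if_neg hltb]
        refine ⟨by simp [ha], by simp [hb], hba, ?_⟩
        intro x hx
        rcases List.mem_append.1 hx with h1 | h1
        · exact hall x h1
        · exact Or.inr (le_of_lt ((List.mem_singleton.1 h1) ▸ hcb))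

theorem isTop2_foldl {l : List Int} (hnd : l.Nodup) :
    IsTop2 l (l.foldl top2step (none, none)) := by
  induction l using List.reverseRecOn with
  | nil => exact rfl
  | append_singleton l c ih =>
    have hnd' : l.Nodup := hnd.of_append_left
    have hc : c ∉ l := by
      intro h
      have := List.disjoint_of_nodup_append hnd
      exact this h (List.mem_singleton.2 rfl)
    rw [List.foldl_append]
    simpa using isTop2_step (ih hnd') hc

theorem isTop2_congr {l l' : List Int} {t : Option Int × Option Int}
    (h : IsTop2 l t) (hmem : ∀ x, x ∈ l ↔ x ∈ l') : IsTop2 l' t := by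
  obtain ⟨t1, t2⟩ := t
  match t1, t2 with
  | none, none =>
    have hl : l = [] := h
    subst hl
    have : l' = [] := by
      cases hl' : l' with
      | nil => rfl
      | cons y ys => exact absurd ((hmem y).2 (by rw [hl']; simp)) (by simp)
    exact this
  | none, some b => exact absurd h (by simp [IsTop2])
  | some a, none =>
    obtain ⟨ha, hall⟩ := h
    exact ⟨(hmem a).1 ha, fun x hx => hall x ((hmem x).2 hx)⟩
  | some a, some b =>
    obtain ⟨ha, hb, hba, hall⟩ := h
    exact ⟨(hmem a).1 ha, (hmem b).1 hb, hba, fun x hx => hall x ((hmem x).2 hx)⟩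

theorem isTop2_unique {l l' : List Int} {t t' : Option Int × Option Int}
    (h1 : IsTop2 l t) (h2 : IsTop2 l' t') (hmem : ∀ x, x ∈ l ↔ x ∈ l') : t = t' := by
  have h2' : IsTop2 l t' := isTop2_congr h2 (fun x => (hmem x).symm)
  clear h2 hmem
  obtain ⟨t1, t2⟩ := t
  obtain ⟨s1, s2⟩ := t'
  match t1, t2, s1, s2 with
  | none, none, none, none => rfl
  | none, none, some a, none =>
    have hl : l = [] := h1
    subst hl
    exact absurd h2'.1 (by simp)
  | none, none, some a, some b =>
    have hl : l = [] := h1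
    subst hl
    exact absurd h2'.1 (by simp)
  | none, none, none, some b => exact absurd h2' (by simp [IsTop2])
  | some a, none, none, none =>
    have hl : l = [] := h2'
    subst hl
    exact absurd h1.1 (by simp)
  | some a, some b, none, none =>
    have hl : l = [] := h2'
    subst hl
    exact absurd h1.1 (by simp)
  | none, some b, _, _ => exact absurd h1 (by simp [IsTop2])
  | some a, none, none, some b => exact absurd h2' (by simp [IsTop2])
  | some a, some b, none, some b' => exact absurd h2' (by simp [IsTop2])
  | some a, none, some a', none =>
    obtain ⟨ha, hall⟩ := h1
    obtain ⟨ha', hall'⟩ := h2'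
    rw [hall a' ha']
  | some a, none, some a', some b' =>
    obtain ⟨ha, hall⟩ := h1
    obtain ⟨ha', hb', hba', hall'⟩ := h2'
    have e1 : a' = a := hall a' ha'
    have e2 : b' = a := hall b' hb'
    rw [e1, e2] at hba'
    exact absurd hba' (lt_irrefl a)
  | some a, some b, some a', none =>
    obtain ⟨ha, hb, hba, hall⟩ := h1
    obtain ⟨ha', hall'⟩ := h2'
    have e1 : a = a' := hall' a ha
    have e2 : b = a' := hall' b hb
    rw [e1, e2] at hba
    exact absurd hba (lt_irrefl a')
  | some a, some b, some a', some b' =>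
    obtain ⟨ha, hb, hba, hall⟩ := h1
    obtain ⟨ha', hb', hba', hall'⟩ := h2'
    have haa : a = a' := by
      rcases hall' a ha with h | h <;> rcases hall a' ha' with h2 | h2 <;> omega
    have hbb : b = b' := by
      rcases hall' b hb with h | h <;> rcases hall b' hb' with h2 | h2 <;> omega
    rw [haa, hbb]

-- ---- a group and its summary ----
def GSRel (g : List Int) (s : Int × Option Int × Option Int) : Prop :=
  g.Nodup ∧ s.1 = (g.length : Int) ∧ IsTop2 g (s.2.1, s.2.2)

-- ---- the adjacency dict built by both programs, and its shape ----
theorem buildAdjA_flat (l : List (List Int)) (d : PySem.Dict Int (List Int)) :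
    l.foldl (fun d p =>
      (d.modify (PySem.List.pyGetD p 0 0) [] (· ++ [PySem.List.pyGetD p 1 0])).modify
        (PySem.List.pyGetD p 1 0) [] (· ++ [PySem.List.pyGetD p 0 0])) d =
    (l.flatMap fun p => [(PySem.List.pyGetD p 0 0, PySem.List.pyGetD p 1 0),
        (PySem.List.pyGetD p 1 0, PySem.List.pyGetD p 0 0)]).foldl
      (fun d q => d.modify q.1 [] (· ++ [q.2])) d := by
  induction l generalizing d with
  | nil => rfl
  | cons p t ih => simp only [List.foldl_cons, List.flatMap_cons, List.foldl_append, ih]; rfl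

theorem buildAdjA_getD (l : List (List Int)) (a : Int) :
    (buildAdjA l).getD a [] =
      ((l.flatMap fun p => [(PySem.List.pyGetD p 0 0, PySem.List.pyGetD p 1 0),
          (PySem.List.pyGetD p 1 0, PySem.List.pyGetD p 0 0)]).filter
        (fun q => q.1 == a)).map (·.2) := by
  rw [buildAdjA, buildAdjA_flat, PySem.Dict.getD_foldl_modify_append]
  simp [PySem.Dict.getD_empty]

theorem buildAdjA_sym (l : List (List Int)) : SymAdj (buildAdjA l) := by
  intro a b hab
  unfold AdjRel at hab ⊢
  rw [buildAdjA_getD] at hab ⊢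
  simp only [List.mem_map, List.mem_filter, List.mem_flatMap, beq_iff_eq] at hab ⊢
  obtain ⟨q, ⟨⟨p, hp, hq⟩, hq1⟩, hq2⟩ := hab
  simp only [List.mem_cons] at hq
  rcases hq with rfl | hq
  · exact ⟨(PySem.List.pyGetD p 1 0, PySem.List.pyGetD p 0 0),
      ⟨⟨p, hp, by simp⟩, by simp_all⟩, by simp_all⟩
  · rcases (List.mem_singleton.1 (by simpa using hq) : _ = _) with rfl
    exact ⟨(PySem.List.pyGetD p 0 0, PySem.List.pyGetD p 1 0),
      ⟨⟨p, hp, by simp⟩, by simp_all⟩, by simp_all⟩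

theorem buildAdjA_keys_nodup (l : List (List Int)) : (buildAdjA l).keys.Nodup := by
  rw [buildAdjA, buildAdjA_flat]
  exact PySem.Dict.nodup_keys_foldl_modify_key _ Prod.fst []
    (fun _ q => (· ++ [q.2])) PySem.Dict.empty (by simp)

-- ---- one company: the two folds produce summary-related outputs ----
theorem forall₂_append_pv {R : List Int → (Int × Option Int × Option Int) → Prop}
    {a c : List (List Int)} {b d : List (Int × Option Int × Option Int)}
    (h1 : List.Forall₂ R a b) (h2 : List.Forall₂ R c d) : List.Forall₂ R (a ++ c) (b ++ d) := by
  induction h1 with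
  | nil => exact h2
  | cons hr _ ih => exact List.Forall₂.cons hr ih

theorem comp_fold (adj : PySem.Dict Int (List Int)) (hsym : SymAdj adj) :
    ∀ (fds : List (Int × List Int)) (VA VB : PySem.Set Int)
      (ag : List (List Int)) (sl : List (Int × Option Int × Option Int)),
      (∀ fd ∈ fds, fd.2 = adj.getD fd.1 []) →
      (∀ x, x ∈ VA ↔ x ∈ VB) → VA.Nodup → VB.Nodup → Closed adj VA →
      List.Forall₂ GSRel ag sl →
      (∀ x, x ∈ (fds.foldl (compStepA adj) (VA, ag)).1 ↔ x ∈ (fds.foldl (compStepB adj) (VB, sl)).1) ∧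
      (fds.foldl (compStepA adj) (VA, ag)).1.Nodup ∧
      (fds.foldl (compStepB adj) (VB, sl)).1.Nodup ∧
      Closed adj (fds.foldl (compStepA adj) (VA, ag)).1 ∧
      List.Forall₂ GSRel (fds.foldl (compStepA adj) (VA, ag)).2 (fds.foldl (compStepB adj) (VB, sl)).2 := by
  intro fds
  induction fds with
  | nil =>
    intro VA VB ag sl hfds hmem hndA hndB hclA hrel
    exact ⟨hmem, hndA, hndB, hclA, hrel⟩
  | cons fd fds ih =>
    intro VA VB ag sl hfds hmem hndA hndB hclA hrel
    have hfd : fd.2 = adj.getD fd.1 [] := hfds fd List.mem_cons_self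
    have hclB : Closed adj VB := fun v hv nn h => (hmem nn).1 (hclA v ((hmem v).2 hv) nn h)
    by_cases hf : fd.1 ∈ VA
    · have hA : PySem.Set.contains VA fd.1 = true := (PySem.Set.contains_iff _ _).2 hf
      have hB : PySem.Set.contains VB fd.1 = true := (PySem.Set.contains_iff _ _).2 ((hmem _).1 hf)
      have e1 : compStepA adj (VA, ag) fd = (VA, ag) := by simp [compStepA, hf]
      have e2 : compStepB adj (VB, sl) fd = (VB, sl) := by simp [compStepB, (hmem fd.1).1 hf]
      simp only [List.foldl_cons, e1, e2]
      exact ih VA VB ag sl (fun x hx => hfds x (List.mem_cons_of_mem _ hx)) hmem hndA hndB hclA hrel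
    · have hfB : fd.1 ∉ VB := fun h => hf ((hmem _).2 h)
      have hA : PySem.Set.contains VA fd.1 = false := by
        rw [← Bool.not_eq_true]; exact fun h => hf ((PySem.Set.contains_iff _ _).1 h)
      have hB : PySem.Set.contains VB fd.1 = false := by
        rw [← Bool.not_eq_true]; exact fun h => hfB ((PySem.Set.contains_iff _ _).1 h)
      have haddA : PySem.Set.add VA fd.1 = VA ++ [fd.1] := PySem.Set.add_of_not_mem hf
      have hndA1 : (VA ++ [fd.1]).Nodup := by
        refine List.Nodup.append hndA (List.nodup_singleton _) ?_
        intro a ha hb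
        rcases List.mem_singleton.1 hb with rfl
        exact hf ha
      obtain ⟨GA, hrA, hndA', hiffA⟩ := pyBfs_spec adj hsym VA [fd.1] fd.2 fd.1 hclA
        hndA1 hf (Or.inl (List.mem_singleton.2 rfl))
        (by intro x hx; rcases List.mem_singleton.1 hx with rfl; exact Relation.ReflTransGen.refl)
        (by intro w hw
            refine Relation.ReflTransGen.single ?_
            unfold AdjRel
            rw [← hfd]; exact hw)
        (by intro v hv nn hadj
            have hveq : v = fd.1 := List.mem_singleton.1 hv
            rw [hveq] at hadj
            right
            rw [hfd]; exact hadj)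
      obtain ⟨GB, hrB, hndB', hiffB⟩ := pyDfs_spec adj hsym VB [] [fd.1] fd.1 hclB
        (by simpa using hndB) hfB (Or.inr (List.mem_singleton.2 rfl))
        (by intro x hx; cases hx)
        (by intro w hw; rcases List.mem_singleton.1 hw with rfl; exact Relation.ReflTransGen.refl)
        (by intro v hv nn hadj; cases hv)
      have hrB' : pyDfs adj VB 0 none none [fd.1] =
          (VB ++ GB, ((GB.length : Int), (GB.foldl top2step (none, none)).1,
            (GB.foldl top2step (none, none)).2)) := by
        simpa using hrB
      have e1 : compStepA adj (VA, ag) fd = (VA ++ GA, ag ++ [GA]) := by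
        simp only [compStepA, hA, Bool.false_eq_true, if_false, haddA, hrA]
      have e2 : compStepB adj (VB, sl) fd =
          (VB ++ GB, sl ++ [((GB.length : Int), (GB.foldl top2step (none, none)).1,
            (GB.foldl top2step (none, none)).2)]) := by
        simp only [compStepB, hB, Bool.false_eq_true, if_false, hrB']
      simp only [List.foldl_cons, e1, e2]
      -- invariants after absorbing the new component
      have hndGA : GA.Nodup := hndA'.of_append_right
      have hndGB : GB.Nodup := hndB'.of_append_right
      have hiffAB : ∀ x, x ∈ GA ↔ x ∈ GB := fun x => (hiffA x).trans (hiffB x).symm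
      have hlen : GA.length = GB.length :=
        ((List.perm_ext_iff_of_nodup hndGA hndGB).2 hiffAB).length_eq
      have hmem' : ∀ x, x ∈ VA ++ GA ↔ x ∈ VB ++ GB := by
        intro x
        simp only [List.mem_append]
        exact or_congr (hmem x) (hiffAB x)
      have hclA' : Closed adj (VA ++ GA) := by
        intro v hv nn hadj
        rcases List.mem_append.1 hv with h | h
        · exact List.mem_append.2 (Or.inl (hclA v h nn hadj))
        · exact List.mem_append.2 (Or.inr ((hiffA nn).2 (((hiffA v).1 h).tail hadj)))
      have hrelnew : GSRel GA ((GB.length : Int), (GB.foldl top2step (none, none)).1,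
          (GB.foldl top2step (none, none)).2) := by
        refine ⟨hndGA, by rw [hlen], ?_⟩
        have := isTop2_congr (isTop2_foldl hndGB) (fun x => (hiffAB x).symm)
        simpa using this
      exact ih (VA ++ GA) (VB ++ GB) (ag ++ [GA]) _
        (fun x hx => hfds x (List.mem_cons_of_mem _ hx)) hmem' hndA' hndB' hclA'
        (forall₂_append_pv hrel (List.forall₂_cons.2 ⟨hrelnew, List.Forall₂.nil⟩))

theorem setdefault_modify_pv (d : PySem.Dict Int (List Int)) (k : Int) (f : List Int → List Int) :
    (d.setdefault k []).modify k [] f = d.modify k [] f := by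
  by_cases hc : d.contains k
  · rw [PySem.Dict.setdefault_of_contains d [] hc]
  · have hcf : d.contains k = false := by simpa using hc
    rw [PySem.Dict.setdefault_of_not_contains d [] hcf]
    unfold PySem.Dict.modify
    rw [PySem.Dict.getD_insert_self, PySem.Dict.insert_insert_self,
      PySem.Dict.getD_of_not_contains d [] hcf]

-- B's setdefault/append loop builds the same dict as A's defaultdict loop
theorem buildAdjB_eq (l : List (List Int)) : buildAdjB l = buildAdjA l := by
  unfold buildAdjB buildAdjA
  suffices h : ∀ d : PySem.Dict Int (List Int),
      l.foldl (fun d p =>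
        (((d.setdefault (PySem.List.pyGetD p 0 0) []).modify (PySem.List.pyGetD p 0 0) []
            (· ++ [PySem.List.pyGetD p 1 0])).setdefault (PySem.List.pyGetD p 1 0) []).modify
          (PySem.List.pyGetD p 1 0) [] (· ++ [PySem.List.pyGetD p 0 0])) d =
      l.foldl (fun d p =>
        (d.modify (PySem.List.pyGetD p 0 0) [] (· ++ [PySem.List.pyGetD p 1 0])).modify
          (PySem.List.pyGetD p 1 0) [] (· ++ [PySem.List.pyGetD p 0 0])) d from h _
  induction l with
  | nil => intro d; rfl
  | cons p t ih =>
    intro d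
    simp only [List.foldl_cons]
    rw [setdefault_modify_pv, setdefault_modify_pv]
    exact ih _

theorem company_rel (ag : List (List Int)) (sl : List (Int × Option Int × Option Int))
    (cf : Int × List (List Int)) (hrel : List.Forall₂ GSRel ag sl) :
    List.Forall₂ GSRel (companyA ag cf) (companyB sl cf) := by
  unfold companyA companyB
  rw [buildAdjB_eq]
  have hnd := buildAdjA_keys_nodup cf.2
  have hitems := PySem.Dict.items_eq_map_keys (buildAdjA cf.2) hnd ([] : List Int)
  have hfds : ∀ fd ∈ (buildAdjA cf.2).items, fd.2 = (buildAdjA cf.2).getD fd.1 [] := by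
    intro fd hfd
    rw [hitems] at hfd
    obtain ⟨k, _, rfl⟩ := List.mem_map.1 hfd
    rfl
  exact (comp_fold (buildAdjA cf.2) (buildAdjA_sym cf.2) (buildAdjA cf.2).items [] [] ag sl
    hfds (fun x => Iff.rfl) List.nodup_nil List.nodup_nil (fun v hv => absurd hv (by simp))
    hrel).2.2.2.2

theorem outer_fold (cs : List (Int × List (List Int))) :
    ∀ (ag : List (List Int)) (sl : List (Int × Option Int × Option Int)),
      List.Forall₂ GSRel ag sl →
      List.Forall₂ GSRel (cs.foldl companyA ag) (cs.foldl companyB sl) := by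
  induction cs with
  | nil => exact fun ag sl h => h
  | cons cf cst ih =>
    intro ag sl hrel
    simp only [List.foldl_cons]
    exact ih _ _ (company_rel ag sl cf hrel)

-- ---- the aggregation passes agree on summary-related lists ----
def pvAggStep (mp : Int) (g : List Int) : Int :=
  if 2 ≤ g.length then
    max (PySem.List.pyGetD (PySem.List.sorted g (fun x => x) true) 0 0 *
      PySem.List.pyGetD (PySem.List.sorted g (fun x => x) true) 1 0) mp
  else mp

theorem aggLoopA_filter (M : Nat) :
    ∀ (l : List (List Int)) (mp : Int),
      l.Pairwise (fun a b => b.length ≤ a.length) → (∀ g ∈ l, g.length ≤ M) →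
      aggLoopA l M mp = (l.filter (fun g => g.length == M)).foldl pvAggStep mp := by
  intro l
  induction l with
  | nil => intro mp _ _; rfl
  | cons g rest ih =>
    intro mp hpw hbd
    rcases List.pairwise_cons.1 hpw with ⟨hhead, htail⟩
    by_cases hgM : g.length = M
    · rw [aggLoopA, if_pos hgM, List.filter_cons_of_pos (by simp [hgM]), List.foldl_cons,
        ih _ htail (fun x hx => hbd x (List.mem_cons_of_mem _ hx))]
      rfl
    · rw [aggLoopA, if_neg hgM, List.filter_cons_of_neg (by simp [hgM])]
      have hnil : rest.filter (fun g => g.length == M) = [] := by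
        rw [List.filter_eq_nil_iff]
        intro b hb
        have h1 : b.length ≤ g.length := hhead b hb
        have h2 : g.length ≤ M := hbd g List.mem_cons_self
        simp only [beq_iff_eq]
        omega
      rw [hnil]
      rfl

theorem foldl_max_shift (t : List Int) (a b : Int) :
    t.foldl max (max a b) = max a (t.foldl max b) := by
  induction t generalizing b with
  | nil => rfl
  | cons c t ih => simp only [List.foldl_cons, max_assoc]; exact ih (max b c)

theorem max?_append_zero (l : List Int) :
    (PySem.List.max? (l ++ [(0 : Int)]) (fun x => x)).getD 0 = l.foldl max 0 := by
  cases l with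
  | nil => simp [PySem.List.max?_id_cons]
  | cons p t =>
    rw [List.cons_append, PySem.List.max?_id_cons]
    simp only [Option.getD_some]
    rw [List.foldl_append]
    simp only [List.foldl_cons, List.foldl_nil]
    rw [foldl_max_shift t 0 p]
    exact max_comm _ _

theorem forall₂_mem_left {ag : List (List Int)} {sl : List (Int × Option Int × Option Int)}
    (h : List.Forall₂ GSRel ag sl) : ∀ g ∈ ag, ∃ s ∈ sl, GSRel g s := by
  induction h with
  | nil => intro g hg; cases hg
  | cons h1 _ ih =>
    intro g hg
    rcases List.mem_cons.1 hg with rfl | hg2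
    · exact ⟨_, List.mem_cons_self, h1⟩
    · obtain ⟨s, hs, hrel⟩ := ih g hg2
      exact ⟨s, List.mem_cons_of_mem _ hs, hrel⟩

theorem forall₂_mem_right {ag : List (List Int)} {sl : List (Int × Option Int × Option Int)}
    (h : List.Forall₂ GSRel ag sl) : ∀ s ∈ sl, ∃ g ∈ ag, GSRel g s := by
  induction h with
  | nil => intro s hs; cases hs
  | cons h1 _ ih =>
    intro s hs
    rcases List.mem_cons.1 hs with rfl | hs2
    · exact ⟨_, List.mem_cons_self, h1⟩
    · obtain ⟨g, hg, hrel⟩ := ih s hs2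
      exact ⟨g, List.mem_cons_of_mem _ hg, hrel⟩

theorem prod_top2 {g : List Int} {s : Int × Option Int × Option Int}
    (hrel : GSRel g s) (h2 : 2 ≤ g.length) :
    PySem.List.pyGetD (PySem.List.sorted g (fun x => x) true) 0 0 *
      PySem.List.pyGetD (PySem.List.sorted g (fun x => x) true) 1 0 =
    s.2.1.getD 0 * s.2.2.getD 0 := by
  obtain ⟨hnd, hs1, htop⟩ := hrel
  have hperm : (PySem.List.sorted g (fun x => x) true).Perm g := PySem.List.sorted_perm g _ true
  have hlen : (PySem.List.sorted g (fun x => x) true).length = g.length := hperm.length_eq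
  have hpw := PySem.List.sorted_pairwise_rev g (fun x => x)
  have hndgs : (PySem.List.sorted g (fun x => x) true).Nodup := hperm.nodup_iff.2 hnd
  cases hgs : PySem.List.sorted g (fun x => x) true with
  | nil => rw [hgs] at hlen; simp at hlen; omega
  | cons x t =>
    cases t with
    | nil => rw [hgs] at hlen; simp at hlen; omega
    | cons y u =>
      rw [hgs] at hperm hpw hndgs
      have hyx : y ≤ x := (List.pairwise_cons.1 hpw).1 y (List.mem_cons_self)
      have hxy : y < x := lt_of_le_of_ne hyx (by
        intro h
        exact (List.nodup_cons.1 hndgs).1 (h ▸ List.mem_cons_self))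
      have hIT : IsTop2 g (some x, some y) := by
        refine ⟨hperm.subset List.mem_cons_self,
          hperm.subset (List.mem_cons_of_mem _ List.mem_cons_self), hxy, ?_⟩
        intro z hz
        have hz2 : z ∈ x :: y :: u := (hperm.mem_iff).2 hz
        rcases List.mem_cons.1 hz2 with rfl | hz3
        · exact Or.inl rfl
        · rcases List.mem_cons.1 hz3 with rfl | hz4
          · exact Or.inr le_rfl
          · have := (List.pairwise_cons.1 (List.pairwise_cons.1 hpw).2).1 z hz4
            exact Or.inr this
      have heq : ((s.2.1, s.2.2) : Option Int × Option Int) = (some x, some y) :=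
        isTop2_unique htop hIT (fun _ => Iff.rfl)
      have h1 : s.2.1 = some x := congrArg Prod.fst heq
      have h22 : s.2.2 = some y := congrArg Prod.snd heq
      rw [h1, h22]
      simp [pysem]

theorem fold_pointwise (M : Nat) {ag : List (List Int)}
    {sl : List (Int × Option Int × Option Int)} (h : List.Forall₂ GSRel ag sl) :
    ∀ mp : Int,
      (ag.filter (fun g => g.length == M)).foldl pvAggStep mp =
      ((sl.filter (fun s => decide (s.1 = (M : Int) ∧ 2 ≤ s.1))).map
        (fun s => s.2.1.getD 0 * s.2.2.getD 0)).foldl max mp := by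
  induction h with
  | nil => intro mp; rfl
  | @cons a b l1 l2 h1 _ ih =>
    intro mp
    obtain ⟨hnd, hs1, htop⟩ := h1
    by_cases hgM : a.length = M
    · have hsM : b.1 = (M : Int) := by rw [hs1, hgM]
      by_cases h2 : 2 ≤ a.length
      · have hs2 : (2 : Int) ≤ b.1 := by rw [hs1]; exact_mod_cast h2
        rw [List.filter_cons_of_pos (by simp [hgM]),
          List.filter_cons_of_pos (by simp only [decide_eq_true_eq]; exact ⟨hsM, hs2⟩),
          List.map_cons, List.foldl_cons, List.foldl_cons, ih]
        congr 1
        unfold pvAggStep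
        rw [if_pos h2, prod_top2 ⟨hnd, hs1, htop⟩ h2]
        exact max_comm _ _
      · have hs2 : ¬ ((2 : Int) ≤ b.1) := by
          rw [hs1]; exact_mod_cast h2
        rw [List.filter_cons_of_pos (by simp [hgM]), List.foldl_cons,
          List.filter_cons_of_neg (by simp [hs2])]
        have hstep : pvAggStep mp a = mp := by unfold pvAggStep; rw [if_neg h2]
        rw [hstep]
        exact ih mp
    · have hsM : ¬ (b.1 = (M : Int)) := by
        rw [hs1]; exact_mod_cast hgM
      rw [List.filter_cons_of_neg (by simp [hgM]),
        List.filter_cons_of_neg (by simp [hsM])]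
      exact ih mp

theorem agg_eq {ag : List (List Int)} {sl : List (Int × Option Int × Option Int)}
    (hrel : List.Forall₂ GSRel ag sl) :
    aggLoopA (PySem.List.sorted ag (fun g => g.length) true)
      (PySem.List.pyGetD (PySem.List.sorted ag (fun g => g.length) true) 0 []).length 0 =
    (if sl = [] then 0
     else (PySem.List.max? (((sl.filter (fun s =>
         decide (s.1 = (PySem.List.max? (sl.map (fun s => s.1)) (fun x => x)).getD 0 ∧
           2 ≤ s.1))).map (fun s => s.2.1.getD 0 * s.2.2.getD 0)) ++ [(0 : Int)])
       (fun x => x)).getD 0) := by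
  by_cases hag : ag = []
  · subst hag
    have hsl : sl = [] := by cases hrel; rfl
    subst hsl
    rw [if_pos rfl, (PySem.List.sorted_eq_nil_iff _ _ _).2 rfl]
    rfl
  · have hslne : sl ≠ [] := by
      cases hrel with
      | nil => exact absurd rfl hag
      | cons _ _ => simp
    rw [if_neg hslne]
    cases hSG : PySem.List.sorted ag (fun g => g.length) true with
    | nil => exact absurd ((PySem.List.sorted_eq_nil_iff _ _ _).1 hSG) hag
    | cons hg tg =>
      have hbound : ∀ g ∈ ag, g.length ≤ hg.length :=
        PySem.List.key_head_sorted_rev_ge ag _ hSG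
      have hgag : hg ∈ ag := by
        have : hg ∈ PySem.List.sorted ag (fun g => g.length) true := by
          rw [hSG]; exact List.mem_cons_self
        exact (PySem.List.sorted_perm ag (fun g => g.length) true).subset this
      -- the running max of the sizes is the length of the head of the sorted list
      have hmM : (PySem.List.max? (sl.map (fun s => s.1)) (fun x => x)).getD 0 =
          (hg.length : Int) := by
        cases hsl0 : sl with
        | nil => exact absurd hsl0 hslne
        | cons s0 st =>
          rw [List.map_cons, PySem.List.max?_id_cons, Option.getD_some]
          have hub := PySem.List.le_foldl_max (st.map (fun s => s.1)) s0.1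
          have hmem := PySem.List.foldl_max_mem (st.map (fun s => s.1)) s0.1
          refine le_antisymm ?_ ?_
          · -- every size is the length of some group, hence ≤ hg.length
            rcases hmem with he | he
            · obtain ⟨g, hgmem, hgrel⟩ := forall₂_mem_right hrel s0 (by rw [hsl0]; exact List.mem_cons_self)
              rw [he, hgrel.2.1]
              exact_mod_cast hbound g hgmem
            · obtain ⟨s, hsmem, hse⟩ := List.mem_map.1 he
              obtain ⟨g, hgmem, hgrel⟩ := forall₂_mem_right hrel s (by rw [hsl0]; exact List.mem_cons_of_mem _ hsmem)
              rw [← hse, hgrel.2.1]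
              exact_mod_cast hbound g hgmem
          · -- hg's own summary size reaches the running max
            obtain ⟨sH, hsH, hrelH⟩ := forall₂_mem_left hrel hg hgag
            rw [hsl0] at hsH
            rcases List.mem_cons.1 hsH with rfl | hsH2
            · rw [← hrelH.2.1]; exact hub.1
            · rw [← hrelH.2.1]
              exact hub.2 sH.1 (List.mem_map.2 ⟨sH, hsH2, rfl⟩)
      rw [PySem.List.pyGetD_zero_cons]
      have hpw : (hg :: tg).Pairwise (fun a b => b.length ≤ a.length) := by
        have := PySem.List.sorted_pairwise_rev ag (fun g => g.length)
        rwa [hSG] at this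
      have hperm2 : (hg :: tg).Perm ag := by
        have := PySem.List.sorted_perm ag (fun g => g.length) true
        rwa [hSG] at this
      have hbd2 : ∀ g ∈ hg :: tg, g.length ≤ hg.length := fun g hgm =>
        hbound g (hperm2.subset hgm)
      rw [aggLoopA_filter hg.length (hg :: tg) 0 hpw hbd2]
      rw [hmM, max?_append_zero, ← fold_pointwise hg.length hrel 0]
      exact @List.Perm.foldl_eq _ _ pvAggStep _ _ ⟨by
        intro b a1 a2
        unfold pvAggStep
        split_ifs <;> simp [max_left_comm]⟩ (hperm2.filter _) 0

-- ===== VERDICT (by name: the statement is the Claim_ definition above) =====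
-- ===== VERDICT (by name: the statement is the Claim_ definition above) =====
theorem largest_group_in_same_company_spec : Claim_equal_largest_group_in_same_company := by
  intro pf _ _
  unfold Spec_largest_group_in_same_company
  unfold largest_group_in_same_company largest_group_in_same_company_alt
  have hrel := outer_fold
    ((pf.foldl (fun d friends =>
      d.modify (PySem.List.pyGetD friends 2 0) []
        (· ++ [[PySem.List.pyGetD friends 0 0, PySem.List.pyGetD friends 1 0]])) PySem.Dict.empty).items)
    [] [] List.Forall₂.nil
  exact agg_eq hrel
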